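-- pv_equiv track=rewrite | github.com/xueyu888/framework | scripts/validate_strict_mapping.py | find_mapping_symbol_line
-- ===== SOURCE A (Python) =====
-- def get_mapping_block_bounds(registry_text: str, map_id: str) -> tuple[int, int]:
--     lines = registry_text.splitlines()
--     start = 1
--     end = len(lines)
--
--     id_token = f'"id": "{map_id}"'
--     for idx, line in enumerate(lines, start=1):
--         if id_token in line:
--             start = idx
--             break
--
--     for idx in range(start + 1, len(lines) + 1):
--         if '"id": "' in lines[idx - 1]:
--             end = idx - 1
--             break
--
--     return start, end
--
-- def find_mapping_symbol_line(registry_text: str, map_id: str, file_name: str, symbol: str) -> int: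
--     lines = registry_text.splitlines()
--     start, end = get_mapping_block_bounds(registry_text, map_id)
--     for idx in range(start, end + 1):
--         line = lines[idx - 1]
--         if file_name in line and symbol in line:
--             return idx
--     return start
-- ===== SOURCE B (Python) =====
-- def find_mapping_symbol_line(registry_text: str, map_id: str, file_name: str, symbol: str) -> int:
--     lines = registry_text.splitlines()
--     id_marker = '"id": "'
--     id_token = f'"id": "{map_id}"'
--     start = next((i for i, line in enumerate(lines, 1) if id_token in line), 1)
--     for idx in range(start, len(lines) + 1):
--         line = lines[idx - 1]
--         if idx > start and id_marker in line:
--             break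
--         if file_name in line and symbol in line:
--             return idx
--     return start
-- ===== Notes on version B (the rewrite author's own statement) =====
-- stated objective: simpler
-- what changed: B inlines the bounds helper and merges A's separate block-end pass and match pass into one forward scan that breaks at the next '"id": "' line, so the block end is never computed explicitly.
import Mathlib
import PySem

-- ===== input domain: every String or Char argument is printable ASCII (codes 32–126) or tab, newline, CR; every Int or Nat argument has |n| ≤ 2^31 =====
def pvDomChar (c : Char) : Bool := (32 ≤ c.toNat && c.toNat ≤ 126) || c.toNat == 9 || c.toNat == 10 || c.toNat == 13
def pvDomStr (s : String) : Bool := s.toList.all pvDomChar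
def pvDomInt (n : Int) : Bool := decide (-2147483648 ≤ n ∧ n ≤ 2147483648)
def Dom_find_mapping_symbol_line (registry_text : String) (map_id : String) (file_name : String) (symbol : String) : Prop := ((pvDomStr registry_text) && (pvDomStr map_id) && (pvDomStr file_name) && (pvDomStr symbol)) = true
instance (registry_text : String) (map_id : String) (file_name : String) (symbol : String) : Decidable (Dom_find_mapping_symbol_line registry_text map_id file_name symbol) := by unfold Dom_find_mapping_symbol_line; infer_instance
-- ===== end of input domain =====

-- B inlines the helper and merges A's separate block-end pass into the single match scan
-- (break at the next '"id": "' line); objective: simpler (one pass over the block region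
-- instead of a bounds helper plus a second scan), same asymptotic cost.

-- ===== PORT A =====
-- first loop of get_mapping_block_bounds: for idx, line in enumerate(lines, 1): if id_token in line: start=idx; break
def aFindStart (tok : String) : List (Int × String) → Int
  | [] => 1
  | (idx, line) :: rest => if PySem.Str.isIn tok line then idx else aFindStart tok rest

-- second loop: for idx in range(start+1, len(lines)+1): if '"id": "' in lines[idx-1]: end=idx-1; break
-- (indices are always in range here, so '(pyGet? …).getD ""' is exact for lines[idx-1])
def aFindEnd (lines : List String) (n : Int) : List Int → Int
  | [] => n
  | idx :: rest =>
      if PySem.Str.isIn "\"id\": \"" ((PySem.List.pyGet? lines (idx - 1)).getD "") then idx - 1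
      else aFindEnd lines n rest

def get_mapping_block_bounds (registry_text : String) (map_id : String) : Int × Int :=
  let lines := PySem.Str.splitlines registry_text
  let id_token := "\"id\": \"" ++ map_id ++ "\""
  let start := aFindStart id_token (PySem.List.enumerate lines 1)
  let e := aFindEnd lines (lines.length : Int) (PySem.List.pyRange (start + 1) ((lines.length : Int) + 1) 1)
  (start, e)

-- main loop: for idx in range(start, end+1): if file_name in line and symbol in line: return idx
def aScan (lines : List String) (fn sym : String) (start : Int) : List Int → Int
  | [] => start
  | idx :: rest =>
      if PySem.Str.isIn fn ((PySem.List.pyGet? lines (idx - 1)).getD "") &&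
         PySem.Str.isIn sym ((PySem.List.pyGet? lines (idx - 1)).getD "") then idx
      else aScan lines fn sym start rest

def find_mapping_symbol_line (registry_text : String) (map_id : String) (file_name : String) (symbol : String) : Int :=
  let lines := PySem.Str.splitlines registry_text
  let se := get_mapping_block_bounds registry_text map_id
  aScan lines file_name symbol se.1 (PySem.List.pyRange se.1 (se.2 + 1) 1)

-- ===== PORT B =====
-- start = next((i for i, line in enumerate(lines, 1) if id_token in line), 1)
def bStart (tok : String) (lines : List String) : Int :=
  (((PySem.List.enumerate lines 1).find? (fun p => PySem.Str.isIn tok p.2)).map (·.1)).getD 1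

-- single scan: break at the first '"id": "' line strictly after start, else return first match
def bScan (lines : List String) (fn sym : String) (start : Int) : List Int → Int
  | [] => start
  | idx :: rest =>
      if decide (start < idx) && PySem.Str.isIn "\"id\": \"" ((PySem.List.pyGet? lines (idx - 1)).getD "") then start
      else if PySem.Str.isIn fn ((PySem.List.pyGet? lines (idx - 1)).getD "") &&
              PySem.Str.isIn sym ((PySem.List.pyGet? lines (idx - 1)).getD "") then idx
      else bScan lines fn sym start rest

def find_mapping_symbol_line_alt (registry_text : String) (map_id : String) (file_name : String) (symbol : String) : Int :=
  let lines := PySem.Str.splitlines registry_text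
  let start := bStart ("\"id\": \"" ++ map_id ++ "\"") lines
  bScan lines file_name symbol start (PySem.List.pyRange start ((lines.length : Int) + 1) 1)

-- ===== PRECONDITION & SPEC =====
def Spec_find_mapping_symbol_line (registry_text : String) (map_id : String) (file_name : String) (symbol : String) (out : Int) : Prop := out = find_mapping_symbol_line_alt registry_text map_id file_name symbol
instance (registry_text : String) (map_id : String) (file_name : String) (symbol : String) (out : Int) : Decidable (Spec_find_mapping_symbol_line registry_text map_id file_name symbol out) := by unfold Spec_find_mapping_symbol_line; infer_instance

-- ===== CLAIM (what is proved, stated in full; the proofs are below) =====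
def Claim_equal_find_mapping_symbol_line : Prop := ∀ (registry_text : String) (map_id : String) (file_name : String) (symbol : String), Dom_find_mapping_symbol_line registry_text map_id file_name symbol → Spec_find_mapping_symbol_line registry_text map_id file_name symbol (find_mapping_symbol_line registry_text map_id file_name symbol)

-- ===== LEMMAS AND PROOFS =====

-- proof-local abbreviations: 'line idx is a "id": " boundary line' / 'line idx matches fn and sym'
def pvBdry (lines : List String) (idx : Int) : Bool :=
  PySem.Str.isIn "\"id\": \"" ((PySem.List.pyGet? lines (idx - 1)).getD "")
def pvMatch (lines : List String) (fn sym : String) (idx : Int) : Bool :=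
  PySem.Str.isIn fn ((PySem.List.pyGet? lines (idx - 1)).getD "") &&
  PySem.Str.isIn sym ((PySem.List.pyGet? lines (idx - 1)).getD "")

theorem aFindEnd_cons (lines : List String) (n idx : Int) (rest : List Int) :
    aFindEnd lines n (idx :: rest) = if pvBdry lines idx then idx - 1 else aFindEnd lines n rest := rfl
theorem aScan_cons (lines : List String) (fn sym : String) (s idx : Int) (rest : List Int) :
    aScan lines fn sym s (idx :: rest)
      = if pvMatch lines fn sym idx then idx else aScan lines fn sym s rest := rfl
theorem bScan_cons (lines : List String) (fn sym : String) (s idx : Int) (rest : List Int) :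
    bScan lines fn sym s (idx :: rest)
      = if decide (s < idx) && pvBdry lines idx then s
        else if pvMatch lines fn sym idx then idx else bScan lines fn sym s rest := rfl

-- the two start computations agree
theorem aFindStart_eq_find? (tok : String) (l : List (Int × String)) :
    aFindStart tok l = ((l.find? (fun p => PySem.Str.isIn tok p.2)).map (·.1)).getD 1 := by
  induction l with
  | nil => rfl
  | cons p rest ih =>
      obtain ⟨idx, line⟩ := p
      cases hb : PySem.Str.isIn tok line
      · rw [List.find?_cons_of_neg (by simpa using hb)]
        simp only [aFindStart, hb, Bool.false_eq_true, if_false]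
        exact ih
      · rw [List.find?_cons_of_pos (by simpa using hb)]
        simp only [aFindStart, hb, if_true]
        rfl

-- the start index is 1 or one of the enumerated indices
theorem aFindStart_bounds (tok : String) (l : List (Int × String)) :
    aFindStart tok l = 1 ∨ aFindStart tok l ∈ l.map (·.1) := by
  induction l with
  | nil => left; rfl
  | cons p rest ih =>
      obtain ⟨idx, line⟩ := p
      cases hb : PySem.Str.isIn tok line
      · simp only [aFindStart, hb, Bool.false_eq_true, if_false]
        rcases ih with h1 | h1
        · exact Or.inl h1
        · exact Or.inr (by simp only [List.map_cons, List.mem_cons]; exact Or.inr h1)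
      · simp only [aFindStart, hb, if_true]
        exact Or.inr (by simp)

-- characterisation of aFindEnd over the range [lo, lo+m)
theorem aFindEnd_spec (lines : List String) (n : Int) (m : Nat) : ∀ lo : Int,
    (aFindEnd lines n (PySem.List.pyRange lo (lo + m) 1) = n ∧
      ∀ j : Int, lo ≤ j → j < lo + m → pvBdry lines j = false) ∨
    (lo ≤ aFindEnd lines n (PySem.List.pyRange lo (lo + m) 1) + 1 ∧
      aFindEnd lines n (PySem.List.pyRange lo (lo + m) 1) + 1 < lo + m ∧
      pvBdry lines (aFindEnd lines n (PySem.List.pyRange lo (lo + m) 1) + 1) = true ∧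
      ∀ j : Int, lo ≤ j → j < aFindEnd lines n (PySem.List.pyRange lo (lo + m) 1) + 1 →
        pvBdry lines j = false) := by
  induction m with
  | zero =>
      intro lo
      left
      rw [PySem.List.pyRange_one_eq_nil (by omega)]
      exact ⟨rfl, by intro j h1 h2; omega⟩
  | succ m ih =>
      intro lo
      have hcons : PySem.List.pyRange lo (lo + ((m : Nat) + 1 : Nat)) 1
          = lo :: PySem.List.pyRange (lo + 1) (lo + ((m : Nat) + 1 : Nat)) 1 :=
        PySem.List.pyRange_one_cons (by push_cast; omega)
      have hrest : (lo + ((m : Nat) + 1 : Nat) : Int) = (lo + 1) + (m : Nat) := by push_cast; omega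
      rw [hcons, aFindEnd_cons]
      cases hb : pvBdry lines lo
      · rw [if_neg (by simp [hb]), hrest]
        rcases ih (lo + 1) with ⟨he, hall⟩ | ⟨h1, h2, h3, hall⟩
        · left
          refine ⟨he, ?_⟩
          intro j hj1 hj2
          rcases eq_or_lt_of_le hj1 with rfl | hlt
          · exact hb
          · exact hall j (by omega) (by push_cast at hj2 ⊢; omega)
        · right
          refine ⟨by omega, by push_cast at h2 ⊢; omega, h3, ?_⟩
          intro j hj1 hj2
          rcases eq_or_lt_of_le hj1 with rfl | hlt
          · exact hb
          · exact hall j (by omega) hj2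
      · rw [if_pos (by simp [hb])]
        right
        refine ⟨by omega, by push_cast; omega, by simpa using hb, ?_⟩
        intro j h1 h2; omega

-- main loop correspondence: scanning [k, e] (A) equals scanning [k, n] with the break (B)
theorem scan_eq (lines : List String) (fn sym : String) (s n e : Int)
    (Hnb : ∀ j : Int, s < j → j ≤ e → pvBdry lines j = false)
    (Hend : e = n ∨ (s ≤ e ∧ e < n ∧ pvBdry lines (e + 1) = true)) :
    ∀ (m : Nat) (k : Int), k + m = n + 1 → s ≤ k → k ≤ e + 1 →
    aScan lines fn sym s (PySem.List.pyRange k (e + 1) 1)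
      = bScan lines fn sym s (PySem.List.pyRange k (n + 1) 1) := by
  intro m
  induction m with
  | zero =>
      intro k hk hs hke
      have hke' : k = n + 1 := by push_cast at hk; omega
      have he : e = n := by
        rcases Hend with h | h
        · exact h
        · omega
      rw [PySem.List.pyRange_one_eq_nil (by omega), PySem.List.pyRange_one_eq_nil (by omega)]
      rfl
  | succ m ih =>
      intro k hk hs hke
      have hkn : k ≤ n := by push_cast at hk; omega
      have hconsB : PySem.List.pyRange k (n + 1) 1 = k :: PySem.List.pyRange (k + 1) (n + 1) 1 :=
        PySem.List.pyRange_one_cons (by omega)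
      rcases eq_or_lt_of_le hke with hkeq | hklt
      · -- k = e + 1 : A's range is empty, B breaks at the boundary line
        have hA : PySem.List.pyRange k (e + 1) 1 = [] := PySem.List.pyRange_one_eq_nil (by omega)
        rcases Hend with h | ⟨h1, h2, h3⟩
        · omega
        have heB : pvBdry lines k = true := hkeq ▸ h3
        have hsk : s < k := by omega
        rw [hA, hconsB, bScan_cons,
          if_pos (show (decide (s < k) && pvBdry lines k) = true by simp [heB, hsk])]
        rfl
      · -- k ≤ e : not a boundary line (or k = s); both scans test the same match
        have hconsA : PySem.List.pyRange k (e + 1) 1 = k :: PySem.List.pyRange (k + 1) (e + 1) 1 :=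
          PySem.List.pyRange_one_cons (by omega)
        have hguard : (decide (s < k) && pvBdry lines k) = false := by
          by_cases hsk : s < k
          · simp [Hnb k hsk (by omega)]
          · simp [hsk]
        rw [hconsA, hconsB, aScan_cons, bScan_cons,
          if_neg (show ¬((decide (s < k) && pvBdry lines k) = true) by simp [hguard])]
        cases hm2 : pvMatch lines fn sym k
        · simp only [Bool.false_eq_true, if_false]
          exact ih (k + 1) (by push_cast at hk ⊢; omega) (by omega) (by omega)
        · simp

-- assembled core: for any admissible start s the two scans agree
theorem core_eq (lines : List String) (fn sym : String) (s : Int)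
    (h1 : 1 ≤ s) (h2 : s ≤ (lines.length : Int) + 1) :
    aScan lines fn sym s (PySem.List.pyRange s
        (aFindEnd lines (lines.length : Int)
          (PySem.List.pyRange (s + 1) ((lines.length : Int) + 1) 1) + 1) 1)
      = bScan lines fn sym s (PySem.List.pyRange s ((lines.length : Int) + 1) 1) := by
  by_cases hsn : s ≤ (lines.length : Int)
  · have hm : s + 1 + ((((lines.length : Int) - s).toNat : Nat) : Int) = (lines.length : Int) + 1 := by
      omega
    have hspec := aFindEnd_spec lines (lines.length : Int) ((lines.length : Int) - s).toNat (s + 1)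
    rw [hm] at hspec
    have Hnb : ∀ j : Int, s < j →
        j ≤ aFindEnd lines (lines.length : Int) (PySem.List.pyRange (s + 1) ((lines.length : Int) + 1) 1) →
        pvBdry lines j = false := by
      intro j hj1 hj2
      rcases hspec with ⟨he, hall⟩ | ⟨hb1, hb2, hb3, hall⟩
      · exact hall j (by omega) (by omega)
      · exact hall j (by omega) (by omega)
    have Hend : aFindEnd lines (lines.length : Int) (PySem.List.pyRange (s + 1) ((lines.length : Int) + 1) 1) = (lines.length : Int) ∨
        (s ≤ aFindEnd lines (lines.length : Int) (PySem.List.pyRange (s + 1) ((lines.length : Int) + 1) 1) ∧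
         aFindEnd lines (lines.length : Int) (PySem.List.pyRange (s + 1) ((lines.length : Int) + 1) 1) < (lines.length : Int) ∧
         pvBdry lines (aFindEnd lines (lines.length : Int) (PySem.List.pyRange (s + 1) ((lines.length : Int) + 1) 1) + 1) = true) := by
      rcases hspec with ⟨he, _⟩ | ⟨hb1, hb2, hb3, _⟩
      · exact Or.inl he
      · exact Or.inr ⟨by omega, by omega, hb3⟩
    have hse : s ≤ aFindEnd lines (lines.length : Int) (PySem.List.pyRange (s + 1) ((lines.length : Int) + 1) 1) + 1 := by
      rcases Hend with h | h <;> omega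
    exact scan_eq lines fn sym s (lines.length : Int) _ Hnb Hend
      ((lines.length : Int) + 1 - s).toNat s (by omega) le_rfl hse
  · -- s = len + 1 (only for empty text): all three ranges are empty
    rw [PySem.List.pyRange_one_eq_nil (show (lines.length : Int) + 1 ≤ s + 1 by omega)]
    have he : aFindEnd lines (lines.length : Int) ([] : List Int) = (lines.length : Int) := rfl
    rw [he, PySem.List.pyRange_one_eq_nil (show ((lines.length : Int) + 1 : Int) ≤ s by omega)]
    rfl

-- ===== VERDICT (by name: the statement is the Claim_ definition above) =====
theorem find_mapping_symbol_line_spec : Claim_equal_find_mapping_symbol_line := by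
  intro registry_text map_id file_name symbol _
  show aScan (PySem.Str.splitlines registry_text) file_name symbol
        (aFindStart ("\"id\": \"" ++ map_id ++ "\"")
          (PySem.List.enumerate (PySem.Str.splitlines registry_text) 1))
        (PySem.List.pyRange
          (aFindStart ("\"id\": \"" ++ map_id ++ "\"")
            (PySem.List.enumerate (PySem.Str.splitlines registry_text) 1))
          (aFindEnd (PySem.Str.splitlines registry_text) ((PySem.Str.splitlines registry_text).length : Int)
            (PySem.List.pyRange
              (aFindStart ("\"id\": \"" ++ map_id ++ "\"")
                (PySem.List.enumerate (PySem.Str.splitlines registry_text) 1) + 1)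
              (((PySem.Str.splitlines registry_text).length : Int) + 1) 1) + 1) 1)
      = bScan (PySem.Str.splitlines registry_text) file_name symbol
          (bStart ("\"id\": \"" ++ map_id ++ "\"") (PySem.Str.splitlines registry_text))
          (PySem.List.pyRange
            (bStart ("\"id\": \"" ++ map_id ++ "\"") (PySem.Str.splitlines registry_text))
            (((PySem.Str.splitlines registry_text).length : Int) + 1) 1)
  have hst : aFindStart ("\"id\": \"" ++ map_id ++ "\"")
      (PySem.List.enumerate (PySem.Str.splitlines registry_text) 1)
      = bStart ("\"id\": \"" ++ map_id ++ "\"") (PySem.Str.splitlines registry_text) :=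
    aFindStart_eq_find? _ _
  have hb : 1 ≤ aFindStart ("\"id\": \"" ++ map_id ++ "\"")
        (PySem.List.enumerate (PySem.Str.splitlines registry_text) 1) ∧
      aFindStart ("\"id\": \"" ++ map_id ++ "\"")
        (PySem.List.enumerate (PySem.Str.splitlines registry_text) 1)
        ≤ ((PySem.Str.splitlines registry_text).length : Int) + 1 := by
    rcases aFindStart_bounds ("\"id\": \"" ++ map_id ++ "\"")
        (PySem.List.enumerate (PySem.Str.splitlines registry_text) 1) with h | h
    · rw [h]; constructor <;> omega
    · rw [PySem.List.map_fst_enumerate, PySem.List.mem_pyRange_one] at h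
      omega
  rw [hst] at hb ⊢
  exact core_eq (PySem.Str.splitlines registry_text) file_name symbol _ hb.1 hb.2
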